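-- pv_equiv track=rewrite | github.com/exasim-project/foam-format | foam-format.py | fix_os_stream_alignment
-- ===== SOURCE A (Python) =====
-- def fix_os_stream_alignment(in_str: list[str]) -> list[str]:
--     # TODO keep two endl on one line
--     out = []
--     os_state = False
--     for line in in_str:
--         if "os <<" in line:
--             line = line.replace(f"os <<", "os  <<")
--             os_state = "started"
--             out.append(line)
--         elif os_state and not ";" in line:
--             out.append(" " + line)
--         elif os_state and ";" in line:
--             os_state = False
--             out.append(" " + line)
--         else:
--             out.append(line)
--     return out
-- ===== SOURCE B (Python) =====
-- def fix_os_stream_alignment(in_str: list[str]) -> list[str]: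
--     out = []
--     i = 0
--     n = len(in_str)
--     while i < n:
--         line = in_str[i]
--         i += 1
--         if "os <<" not in line:
--             out.append(line)
--             continue
--         # start of an os-stream block
--         out.append(line.replace("os <<", "os  <<"))
--         while i < n:
--             cur = in_str[i]
--             i += 1
--             if "os <<" in cur:
--                 out.append(cur.replace("os <<", "os  <<"))
--             elif ";" in cur:
--                 out.append(" " + cur)
--                 break
--             else:
--                 out.append(" " + cur)
--     return out
-- ===== Notes on version B (the rewrite author's own statement) =====
-- stated objective: alternative
-- what changed: Replaces A's flat single loop with a mutable boolean state flag by a nested two-level loop: an outer scan over lines and an inner loop that consumes the continuation lines of an os << block until a terminating ';' line, so no state variable is threaded through the scan.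
import Mathlib
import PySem

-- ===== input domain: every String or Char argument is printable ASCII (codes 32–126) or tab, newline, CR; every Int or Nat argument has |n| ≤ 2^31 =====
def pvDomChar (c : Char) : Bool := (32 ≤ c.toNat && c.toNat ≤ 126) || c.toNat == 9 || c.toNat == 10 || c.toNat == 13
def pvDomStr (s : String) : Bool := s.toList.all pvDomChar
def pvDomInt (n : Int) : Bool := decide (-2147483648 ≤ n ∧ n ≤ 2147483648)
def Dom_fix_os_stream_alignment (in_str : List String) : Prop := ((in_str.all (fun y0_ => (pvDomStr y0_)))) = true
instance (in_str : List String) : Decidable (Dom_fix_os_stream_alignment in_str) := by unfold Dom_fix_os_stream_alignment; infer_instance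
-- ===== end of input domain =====

-- B replaces A's flat loop threading a boolean state flag by a nested two-level loop
-- (inner loop consumes an os << block until its terminating ';' line); objective: alternative decomposition.

-- ===== PORT A =====
-- literal port of A: one fold over the lines carrying (out, os_state)
def fix_os_stream_alignment (in_str : List String) : List String :=
  (in_str.foldl (fun (st : List String × Bool) line =>
    if PySem.Str.isIn "os <<" line then
      (st.1 ++ [PySem.Str.replace line "os <<" "os  <<"], true)
    else if st.2 && !(PySem.Str.isIn ";" line) then
      (st.1 ++ [" " ++ line], st.2)
    else if st.2 && PySem.Str.isIn ";" line then
      (st.1 ++ [" " ++ line], false)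
    else
      (st.1 ++ [line], st.2)) ([], false)).1

-- ===== PORT B =====
-- inner loop of Source B: consume the continuation lines of a block; returns (emitted lines, remaining lines)
def fosBlock : List String → List String × List String
  | [] => ([], [])
  | cur :: rest =>
    if PySem.Str.isIn "os <<" cur then
      let p := fosBlock rest
      (PySem.Str.replace cur "os <<" "os  <<" :: p.1, p.2)
    else if PySem.Str.isIn ";" cur then
      ([" " ++ cur], rest)
    else
      let p := fosBlock rest
      ((" " ++ cur) :: p.1, p.2)

theorem fosBlock_len_le : ∀ (l : List String), (fosBlock l).2.length ≤ l.length
  | [] => Nat.le_refl _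
  | cur :: rest => by
    simp only [fosBlock]
    split_ifs <;> simp <;> exact Nat.le_succ_of_le (fosBlock_len_le rest)

-- outer loop of Source B
def fix_os_stream_alignment_alt : List String → List String
  | [] => []
  | line :: rest =>
    if PySem.Str.isIn "os <<" line then
      let p := fosBlock rest
      PySem.Str.replace line "os <<" "os  <<" :: (p.1 ++ fix_os_stream_alignment_alt p.2)
    else
      line :: fix_os_stream_alignment_alt rest
termination_by l => l.length
decreasing_by
  · exact Nat.lt_succ_of_le (fosBlock_len_le rest)
  · simp

-- ===== PRECONDITION & SPEC =====
def Spec_fix_os_stream_alignment (in_str : List String) (out : List String) : Prop := out = fix_os_stream_alignment_alt in_str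
instance (in_str : List String) (out : List String) : Decidable (Spec_fix_os_stream_alignment in_str out) := by unfold Spec_fix_os_stream_alignment; infer_instance

-- ===== CLAIM (what is proved, stated in full; the proofs are below) =====
def Claim_equal_fix_os_stream_alignment : Prop := ∀ (in_str : List String), Dom_fix_os_stream_alignment in_str → Spec_fix_os_stream_alignment in_str (fix_os_stream_alignment in_str)

-- ===== LEMMAS AND PROOFS =====

-- the output A produces from state s on the remaining lines (same branch cascade as A's loop body)
def fosRun (s : Bool) : List String → List String
  | [] => []
  | line :: rest =>
    if PySem.Str.isIn "os <<" line then
      PySem.Str.replace line "os <<" "os  <<" :: fosRun true rest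
    else if s && !(PySem.Str.isIn ";" line) then
      (" " ++ line) :: fosRun s rest
    else if s && PySem.Str.isIn ";" line then
      (" " ++ line) :: fosRun false rest
    else
      line :: fosRun s rest

theorem foldl_eq_fosRun : ∀ (l : List String) (out : List String) (s : Bool),
    (l.foldl (fun (st : List String × Bool) line =>
      if PySem.Str.isIn "os <<" line then
        (st.1 ++ [PySem.Str.replace line "os <<" "os  <<"], true)
      else if st.2 && !(PySem.Str.isIn ";" line) then
        (st.1 ++ [" " ++ line], st.2)
      else if st.2 && PySem.Str.isIn ";" line then
        (st.1 ++ [" " ++ line], false)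
      else
        (st.1 ++ [line], st.2)) (out, s)).1 = out ++ fosRun s l
  | [], out, s => by simp [fosRun]
  | line :: rest, out, s => by
    simp only [List.foldl_cons, fosRun]
    split_ifs <;> rw [foldl_eq_fosRun rest] <;> simp

theorem fosRun_eq_alt : ∀ (l : List String),
    fosRun true l = (fosBlock l).1 ++ fix_os_stream_alignment_alt (fosBlock l).2 ∧
    fosRun false l = fix_os_stream_alignment_alt l
  | [] => by simp [fosRun, fosBlock, fix_os_stream_alignment_alt]
  | line :: rest => by
    have ih := fosRun_eq_alt rest
    have ihp := fosRun_eq_alt (fosBlock rest).2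
    constructor
    · simp only [fosRun, fosBlock]
      split_ifs with h1 h2 h3 <;> simp_all
    · simp only [fosRun]
      rw [show fix_os_stream_alignment_alt (line :: rest) =
        if PySem.Str.isIn "os <<" line then
          PySem.Str.replace line "os <<" "os  <<" ::
            ((fosBlock rest).1 ++ fix_os_stream_alignment_alt (fosBlock rest).2)
        else line :: fix_os_stream_alignment_alt rest from by
          rw [fix_os_stream_alignment_alt]]
      split_ifs with h1 <;> simp_all
termination_by l => l.length
decreasing_by
  · simp
  · exact Nat.lt_succ_of_le (fosBlock_len_le rest)

-- ===== VERDICT (by name: the statement is the Claim_ definition above) =====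
theorem fix_os_stream_alignment_spec : Claim_equal_fix_os_stream_alignment := by
  intro l _
  unfold Spec_fix_os_stream_alignment fix_os_stream_alignment
  rw [foldl_eq_fosRun]
  simpa using (fosRun_eq_alt l).2
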